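-- pv_equiv track=rewrite | github.com/applied-research-and-computing/pynq-sdk | pynq_instrument/scpi_parser.py | normalize_scpi
-- ===== SOURCE A (Python) =====
-- from typing import List, Tuple
--
-- def normalize_scpi(raw: str) -> Tuple[str, List[str]]:
--     """
--     Normalize a raw SCPI string.
--
--     Returns (mnemonic, args) where mnemonic is uppercased and args are the
--     space-separated tokens that follow it (quoted strings kept intact).
--
--     Examples:
--         "gpio:set 1 HIGH"      -> ("GPIO:SET", ["1", "HIGH"])
--         "*idn?"                -> ("*IDN?", [])
--         "  TEMP:READ?  "       -> ("TEMP:READ?", [])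
--         'OVERLAY:LOAD "a.bit"' -> ("OVERLAY:LOAD", ['"a.bit"'])
--     """
--     s = raw.strip()
--     if not s:
--         return ("", [])
--
--     # Split mnemonic from args on first whitespace
--     idx = 0
--     while idx < len(s) and not s[idx].isspace():
--         idx += 1
--
--     mnemonic = s[:idx].upper()
--     rest = s[idx:].strip()
--
--     if not rest:
--         return (mnemonic, [])
--
--     args = _split_args(rest)
--     return (mnemonic, args)
--
-- def _split_args(s: str) -> List[str]:
--     """Split SCPI argument string on whitespace, preserving quoted substrings."""
--     args: List[str] = []
--     current: List[str] = []
--     in_quote = False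
--     quote_char = ""
--
--     for ch in s:
--         if in_quote:
--             current.append(ch)
--             if ch == quote_char:
--                 in_quote = False
--         elif ch in ('"', "'"):
--             in_quote = True
--             quote_char = ch
--             current.append(ch)
--         elif ch in (" ", "\t"):
--             if current:
--                 args.append("".join(current))
--                 current = []
--         else:
--             current.append(ch)
--
--     if current:
--         args.append("".join(current))
--
--     return args
-- ===== SOURCE B (Python) =====
-- from typing import List, Tuple
--
-- def normalize_scpi(raw: str) -> Tuple[str, List[str]]:
--     """Split mnemonic with str.split(None, 1), then scan args by index,
--     jumping over quoted runs with str.find instead of a char state machine."""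
--     parts = raw.split(None, 1)
--     if not parts:
--         return ("", [])
--     mnemonic = parts[0].upper()
--     rest = parts[1].strip() if len(parts) == 2 else ""
--     args: List[str] = []
--     i, n = 0, len(rest)
--     while i < n:
--         if rest[i] in " \t":
--             i += 1
--             continue
--         start = i
--         while i < n and rest[i] not in " \t":
--             c = rest[i]
--             if c in "\"'":
--                 j = rest.find(c, i + 1)
--                 i = n if j == -1 else j + 1
--             else:
--                 i += 1
--         args.append(rest[start:i])
--     return (mnemonic, args)
-- ===== Notes on version B (the rewrite author's own statement) =====
-- stated objective: idiomatic
-- what changed: B splits off the mnemonic with str.split(None, 1) instead of A's manual index loop, and tokenizes the argument tail by scanning indices and slicing whole tokens out of the string, jumping across quoted runs with str.find, instead of A's per-character in_quote/quote_char state machine with an accumulator list.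
import Mathlib
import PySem

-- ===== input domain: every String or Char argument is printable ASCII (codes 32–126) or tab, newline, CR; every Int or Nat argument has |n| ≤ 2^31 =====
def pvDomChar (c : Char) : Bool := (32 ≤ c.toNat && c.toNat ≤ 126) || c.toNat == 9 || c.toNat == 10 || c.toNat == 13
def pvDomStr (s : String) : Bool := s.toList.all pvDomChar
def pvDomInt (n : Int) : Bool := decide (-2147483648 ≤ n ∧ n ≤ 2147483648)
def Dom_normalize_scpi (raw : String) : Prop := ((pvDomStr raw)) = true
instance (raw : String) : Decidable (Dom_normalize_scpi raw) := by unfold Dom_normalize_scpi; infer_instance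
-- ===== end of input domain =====

-- B replaces A's manual mnemonic scan by str.split(None, 1) and A's per-character
-- quote state machine by an index scan that slices whole tokens, jumping over quoted
-- runs with str.find (objective: alternative decomposition, same asymptotic cost).

-- ===== PORT A =====

-- the `while idx < len(s) and not s[idx].isspace(): idx += 1` loop
def pvA_mnemLen : List Char → Nat
  | [] => 0
  | c :: cs => if PySem.Chars.isspace c then 0 else pvA_mnemLen cs + 1

-- one iteration of the `for ch in s` loop of _split_args; state = (args, current, in_quote, quote_char)
def pvA_step (st : List (List Char) × List Char × Bool × Char) (ch : Char) :
    List (List Char) × List Char × Bool × Char :=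
  match st with
  | (args, current, inQuote, quoteChar) =>
    if inQuote then
      if ch = quoteChar then (args, current ++ [ch], false, quoteChar)
      else (args, current ++ [ch], true, quoteChar)
    else if ch = '"' ∨ ch = '\'' then (args, current ++ [ch], true, ch)
    else if ch = ' ' ∨ ch = '\t' then
      if current = [] then (args, current, inQuote, quoteChar)
      else (args ++ [current], [], inQuote, quoteChar)
    else (args, current ++ [ch], inQuote, quoteChar)

-- _split_args; Python initializes quote_char to "" (never read while in_quote is False): dummy ' '
def pvA_splitArgs (s : List Char) : List (List Char) :=
  match s.foldl pvA_step ([], [], false, ' ') with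
  | (args, current, _, _) => if current = [] then args else args ++ [current]

def normalize_scpi (raw : String) : String × List String :=
  let s := PySem.Chars.strip raw.toList
  if s = [] then ("", [])
  else
    let idx := pvA_mnemLen s
    let mnemonic := String.ofList (PySem.Chars.upper (s.take idx))  -- s[:idx].upper(), 0 ≤ idx: exact
    let rest := PySem.Chars.strip (s.drop idx)                       -- s[idx:].strip()
    if rest = [] then (mnemonic, [])
    else (mnemonic, (pvA_splitArgs rest).map String.ofList)

-- ===== PORT B =====

-- termination fact for the quote jump: rest.find(c, i+1) is ≥ i+1 when it is not -1
lemma pvB_find_lb (rest : List Char) (c : Char) (i : Nat) (h : i < rest.length)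
    (hne : PySem.Chars.findFrom rest [c] ((i : Int) + 1) none ≠ -1) :
    i < (PySem.Chars.findFrom rest [c] ((i : Int) + 1) none).toNat := by
  have hc : ((i : Int) + 1) = ((i + 1 : Nat) : Int) := by push_cast; ring
  rw [hc, PySem.Chars.findFrom_natCast rest [c] (i + 1) (by omega)] at hne ⊢
  have hr := PySem.Chars.neg_one_le_find (rest.drop (i + 1)) [c]
  split at hne
  · exact absurd rfl hne
  · next h => rw [if_neg h] at *; omega

-- inner `while i < n and rest[i] not in " \t"` loop: returns the index where the token ends
def pvB_tokEnd (rest : List Char) (i : Nat) : Nat :=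
  if h : i < rest.length then
    if rest[i] = ' ' ∨ rest[i] = '\t' then i
    else if hq : rest[i] = '"' ∨ rest[i] = '\'' then
      -- j = rest.find(c, i + 1); i = n if j == -1 else j + 1
      pvB_tokEnd rest
        (if PySem.Chars.findFrom rest [rest[i]] ((i : Int) + 1) none = -1 then rest.length
         else (PySem.Chars.findFrom rest [rest[i]] ((i : Int) + 1) none).toNat + 1)
    else pvB_tokEnd rest (i + 1)
  else i
termination_by rest.length - i
decreasing_by
  · split
    next hj => omega
    next hj => have := pvB_find_lb rest rest[i] i h hj; omega
  · omega

lemma pvB_tokEnd_ge (rest : List Char) : ∀ i, i ≤ pvB_tokEnd rest i := by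
  have H : ∀ k i, rest.length - i ≤ k → i ≤ pvB_tokEnd rest i := by
    intro k
    induction k with
    | zero =>
      intro i hi
      rw [pvB_tokEnd, dif_neg (by omega)]
    | succ k ih =>
      intro i hi
      rw [pvB_tokEnd]
      by_cases h : i < rest.length
      · rw [dif_pos h]
        by_cases hs : rest[i] = ' ' ∨ rest[i] = '\t'
        · rw [if_pos hs]
        · rw [if_neg hs]
          split
          · next hq =>
            by_cases hj : PySem.Chars.findFrom rest [rest[i]] ((i : Int) + 1) none = -1
            · rw [if_pos hj]
              have := ih rest.length (by omega)
              omega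
            · rw [if_neg hj]
              have hlb := pvB_find_lb rest rest[i] i h hj
              have := ih ((PySem.Chars.findFrom rest [rest[i]] ((i : Int) + 1) none).toNat + 1)
                (by omega)
              omega
          · have := ih (i + 1) (by omega)
            omega
      · rw [dif_neg h]
  exact fun i => H rest.length i (by omega)

lemma pvB_tokEnd_gt (rest : List Char) (i : Nat) (h : i < rest.length)
    (hs : ¬(rest[i] = ' ' ∨ rest[i] = '\t')) : i < pvB_tokEnd rest i := by
  rw [pvB_tokEnd]
  rw [dif_pos h, if_neg hs]
  split
  · next hq =>
    by_cases hj : PySem.Chars.findFrom rest [rest[i]] ((i : Int) + 1) none = -1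
    · rw [if_pos hj]
      have := pvB_tokEnd_ge rest rest.length
      omega
    · rw [if_neg hj]
      have hlb := pvB_find_lb rest rest[i] i h hj
      have := pvB_tokEnd_ge rest ((PySem.Chars.findFrom rest [rest[i]] ((i : Int) + 1) none).toNat + 1)
      omega
  · have := pvB_tokEnd_ge rest (i + 1)
    omega

-- outer `while i < n` loop; rest[start:i] with 0 ≤ start ≤ i is (rest.drop start).take (i-start): exact
def pvB_loop (rest : List Char) (i : Nat) (args : List (List Char)) : List (List Char) :=
  if h : i < rest.length then
    if rest[i] = ' ' ∨ rest[i] = '\t' then pvB_loop rest (i + 1) args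
    else
      -- start = i; inner while loop = pvB_tokEnd; args.append(rest[start:i])
      pvB_loop rest (pvB_tokEnd rest i)
        (args ++ [(rest.drop i).take (pvB_tokEnd rest i - i)])
  else args
termination_by rest.length - i
decreasing_by
  · omega
  · have := pvB_tokEnd_gt rest i h (by assumption)
    omega

def normalize_scpi_alt (raw : String) : String × List String :=
  match PySem.Str.split₀Max raw 1 with                  -- raw.split(None, 1)
  | [] => ("", [])
  | [m] => (PySem.Str.upper m, [])
  | m :: r :: _ =>
    (PySem.Str.upper m, (pvB_loop (PySem.Chars.strip r.toList) 0 []).map String.ofList)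

-- ===== PRECONDITION & SPEC =====
def Spec_normalize_scpi (raw : String) (out : String × List String) : Prop := out = normalize_scpi_alt raw
instance (raw : String) (out : String × List String) : Decidable (Spec_normalize_scpi raw out) := by unfold Spec_normalize_scpi; infer_instance

-- ===== CLAIM (what is proved, stated in full; the proofs are below) =====
def Claim_equal_normalize_scpi : Prop := ∀ (raw : String), Dom_normalize_scpi raw → Spec_normalize_scpi raw (normalize_scpi raw)

-- ===== LEMMAS AND PROOFS =====

-- `emit args cur` = what _split_args does to a finished chunk
def pvEmit (args : List (List Char)) (cur : List Char) : List (List Char) :=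
  if cur = [] then args else args ++ [cur]

-- finalize ∘ foldl, the value _split_args returns when started in state (args, cur, inq, qc) on s
def pvF (args : List (List Char)) (cur : List Char) (inq : Bool) (qc : Char) (s : List Char) :
    List (List Char) :=
  match s.foldl pvA_step (args, cur, inq, qc) with
  | (a, c, _, _) => pvEmit a c

def pvSeg (rest : List Char) (a b : Nat) : List Char := (rest.drop a).take (b - a)

lemma pvSeg_self (rest : List Char) (a : Nat) : pvSeg rest a a = [] := by
  simp [pvSeg]

lemma pvSeg_cons (rest : List Char) (a b : Nat) (h : a < rest.length) (hab : a < b) :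
    pvSeg rest a b = rest[a] :: pvSeg rest (a + 1) b := by
  unfold pvSeg
  rw [List.drop_eq_getElem_cons h]
  have : b - a = (b - (a + 1)) + 1 := by omega
  rw [this, List.take_succ_cons]

lemma pvSeg_append (rest : List Char) (a m b : Nat) (h1 : a ≤ m) (h2 : m ≤ b) :
    pvSeg rest a m ++ pvSeg rest m b = pvSeg rest a b := by
  unfold pvSeg
  have hb : b - a = (m - a) + (b - m) := by omega
  rw [hb, List.take_add, List.drop_drop]
  have : a + (m - a) = m := by omega
  rw [this]

lemma pvSeg_all (rest : List Char) (a : Nat) (b : Nat) (hb : rest.length ≤ b) :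
    pvSeg rest a b = rest.drop a := by
  unfold pvSeg
  apply List.take_of_length_le
  simp [List.length_drop]; omega

lemma pvSeg_ne_nil (rest : List Char) (a b : Nat) (h : a < rest.length) (hab : a < b) :
    pvSeg rest a b ≠ [] := by
  rw [pvSeg_cons rest a b h hab]; simp

lemma pvSeg_drop (rest : List Char) (a b : Nat) (h1 : a ≤ b) :
    pvSeg rest a b ++ rest.drop b = rest.drop a := by
  unfold pvSeg
  have hb : b = a + (b - a) := by omega
  rw [hb, ← List.drop_drop]
  have : a + (b - a) - a = b - a := by omega
  rw [this]
  exact List.take_append_drop _ _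

-- pvF does not depend on the stale quote_char while in_quote is False
lemma pvF_qc_irrel (s : List Char) : ∀ args cur qc qc',
    pvF args cur false qc s = pvF args cur false qc' s := by
  induction s with
  | nil => intro args cur qc qc'; rfl
  | cons a t ih =>
    intro args cur qc qc'
    unfold pvF
    by_cases hq : a = '"' ∨ a = '\''
    · simp only [List.foldl_cons, pvA_step, Bool.false_eq_true, if_false, if_pos hq]
    · by_cases hs : a = ' ' ∨ a = '\t'
      · simp only [List.foldl_cons, pvA_step, Bool.false_eq_true, if_false, if_neg hq, if_pos hs]
        split
        · exact ih args cur qc qc'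
        · exact ih (args ++ [cur]) [] qc qc'
      · simp only [List.foldl_cons, pvA_step, Bool.false_eq_true, if_false, if_neg hq, if_neg hs]
        exact ih args (cur ++ [a]) qc qc'

-- in-quote consumption, no closing quote in s
lemma pvInq_no_close (s : List Char) (c : Char) (hc : c ∉ s) :
    ∀ args cur, s.foldl pvA_step (args, cur, true, c) = (args, cur ++ s, true, c) := by
  revert hc
  induction s with
  | nil => intro _ args cur; simp
  | cons a t ih =>
    intro hc args cur
    have ha : a ≠ c := fun h => hc (h ▸ List.mem_cons_self)
    have hm : c ∉ t := fun h => hc (List.mem_cons_of_mem a h)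
    simp only [List.foldl_cons, pvA_step, if_true, if_neg ha]
    rw [ih hm]
    simp

-- in-quote consumption up to the first closing quote
lemma pvInq_close (s1 : List Char) (c : Char) (hc : c ∉ s1) (s2 : List Char) :
    ∀ args cur, (s1 ++ c :: s2).foldl pvA_step (args, cur, true, c)
      = s2.foldl pvA_step (args, cur ++ s1 ++ [c], false, c) := by
  revert hc
  induction s1 with
  | nil =>
    intro _ args cur
    simp only [List.nil_append, List.foldl_cons, pvA_step, if_true, List.append_nil]
  | cons a t ih =>
    intro hc args cur
    have ha : a ≠ c := fun h => hc (h ▸ List.mem_cons_self)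
    have hm : c ∉ t := fun h => hc (List.mem_cons_of_mem a h)
    simp only [List.cons_append, List.foldl_cons, pvA_step, if_true, if_neg ha]
    rw [ih hm]
    simp

lemma pv_singleton_prefix (c : Char) (l : List Char) : [c] <+: l ↔ l.head? = some c := by
  constructor
  · rintro ⟨t, rfl⟩; rfl
  · intro h
    cases l with
    | nil => simp at h
    | cons a t => simp at h; exact ⟨t, by simp [h]⟩

-- what rest.find(c, i+1) means
lemma pvFind_none (rest : List Char) (c : Char) (i : Nat) (hi : i < rest.length)
    (h : PySem.Chars.findFrom rest [c] ((i : Int) + 1) none = -1) :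
    c ∉ rest.drop (i + 1) := by
  have hc : ((i : Int) + 1) = ((i + 1 : Nat) : Int) := by push_cast; ring
  rw [hc, PySem.Chars.findFrom_natCast rest [c] (i + 1) (by omega)] at h
  have hr := PySem.Chars.neg_one_le_find (rest.drop (i + 1)) [c]
  split at h
  · next hf =>
    rw [PySem.Chars.find_eq_neg_one_iff] at hf
    intro hmem
    exact hf ((List.singleton_infix_iff c _).mpr hmem)
  · next hf => omega

lemma pvFind_some (rest : List Char) (c : Char) (i : Nat) (hi : i < rest.length)
    (h : PySem.Chars.findFrom rest [c] ((i : Int) + 1) none ≠ -1) :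
    i + 1 ≤ (PySem.Chars.findFrom rest [c] ((i : Int) + 1) none).toNat ∧
    (PySem.Chars.findFrom rest [c] ((i : Int) + 1) none).toNat < rest.length ∧
    rest[(PySem.Chars.findFrom rest [c] ((i : Int) + 1) none).toNat]? = some c ∧
    c ∉ pvSeg rest (i + 1) (PySem.Chars.findFrom rest [c] ((i : Int) + 1) none).toNat := by
  have hle : i + 1 ≤ rest.length := by omega
  have hc : ((i : Int) + 1) = ((i + 1 : Nat) : Int) := by push_cast; ring
  rw [hc, PySem.Chars.findFrom_natCast rest [c] (i + 1) hle] at h ⊢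
  by_cases hf : PySem.Chars.find (rest.drop (i + 1)) [c] = -1
  · rw [if_pos hf] at h; exact absurd rfl h
  · rw [if_neg hf] at h ⊢
    clear h
    have hr0 : 0 ≤ PySem.Chars.find (rest.drop (i + 1)) [c] := by
      have := PySem.Chars.neg_one_le_find (rest.drop (i + 1)) [c]; omega
    obtain ⟨hpre, hmin⟩ := PySem.Chars.find_spec hr0
    set r := (PySem.Chars.find (rest.drop (i + 1)) [c]).toNat with hrdef
    have hJ : (((i + 1 : Nat) : Int) + PySem.Chars.find (rest.drop (i + 1)) [c]).toNat = i + 1 + r := by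
      omega
    rw [hJ]
    rw [List.drop_drop] at hpre
    obtain ⟨t, ht⟩ := hpre
    have hlen : i + 1 + r < rest.length := by
      have hne : rest.drop (i + 1 + r) ≠ [] := by rw [← ht]; simp
      rw [ne_eq, List.drop_eq_nil_iff] at hne; omega
    refine ⟨by omega, hlen, ?_, ?_⟩
    · have hh : (rest.drop (i + 1 + r)).head? = rest[i + 1 + r]? := by simp
      rw [← ht] at hh; simpa using hh.symm
    · intro hmem
      have hseg : pvSeg rest (i + 1) (i + 1 + r) = (rest.drop (i + 1)).take r := by
        unfold pvSeg; congr 1; omega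
      rw [hseg] at hmem
      obtain ⟨m, hmlt, hme⟩ := List.mem_iff_getElem.mp hmem
      have hmr : m < r := by simpa using (List.length_take_le r (rest.drop (i + 1))).trans_lt' hmlt
      apply hmin m hmr
      rw [pv_singleton_prefix]
      have hmlen : m < (rest.drop (i + 1)).length := by
        rw [List.length_take] at hmlt; omega
      have h1 : (rest.drop (i + 1))[m]? = some c := by
        rw [List.getElem_take] at hme
        simp [List.getElem?_eq_getElem hmlen, hme]
      simpa using h1

-- TOKEN: from a not-in-quote state, _split_args run over rest[i:] behaves as one pvB_tokEnd step
lemma pvTok (rest : List Char) : ∀ i, i ≤ rest.length → ∀ args cur qc,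
    pvF args cur false qc (rest.drop i)
      = (if pvB_tokEnd rest i < rest.length
         then pvF (pvEmit args (cur ++ pvSeg rest i (pvB_tokEnd rest i))) [] false qc
                (rest.drop (pvB_tokEnd rest i))
         else pvEmit args (cur ++ pvSeg rest i (pvB_tokEnd rest i))) := by
  have H : ∀ k i, rest.length - i ≤ k → i ≤ rest.length → ∀ args cur qc,
      pvF args cur false qc (rest.drop i)
        = (if pvB_tokEnd rest i < rest.length
           then pvF (pvEmit args (cur ++ pvSeg rest i (pvB_tokEnd rest i))) [] false qc
                  (rest.drop (pvB_tokEnd rest i))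
           else pvEmit args (cur ++ pvSeg rest i (pvB_tokEnd rest i))) := by
    intro k
    induction k with
    | zero =>
      intro i hk hi args cur qc
      have hie : i = rest.length := by omega
      subst hie
      rw [pvB_tokEnd, dif_neg (lt_irrefl _), if_neg (lt_irrefl _)]
      simp [pvF, pvEmit, pvSeg_self, List.drop_length]
    | succ k ih =>
      intro i hk hi args cur qc
      by_cases h : i < rest.length
      · have hdrop : rest.drop i = rest[i] :: rest.drop (i + 1) := List.drop_eq_getElem_cons h
        rw [pvB_tokEnd, dif_pos h]
        by_cases hs : rest[i] = ' ' ∨ rest[i] = '\t'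
        · rw [if_pos hs, if_pos h, pvSeg_self, List.append_nil]
          have hstep : pvA_step (args, cur, false, qc) rest[i] = (pvEmit args cur, [], false, qc) := by
            rcases hs with h1 | h1 <;> rw [h1] <;> by_cases hcur : cur = [] <;>
              simp [pvA_step, pvEmit, hcur]
          have hstep2 : pvA_step (pvEmit args cur, [], false, qc) rest[i]
              = (pvEmit args cur, [], false, qc) := by
            rcases hs with h1 | h1 <;> rw [h1] <;> simp [pvA_step]
          unfold pvF
          rw [hdrop, List.foldl_cons, List.foldl_cons, hstep, hstep2]
        · rw [if_neg hs]
          split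
          · next hq =>
            have hstep : pvA_step (args, cur, false, qc) rest[i]
                = (args, cur ++ [rest[i]], true, rest[i]) := by
              simp only [pvA_step, Bool.false_eq_true, if_false, if_pos hq]
            by_cases hj : PySem.Chars.findFrom rest [rest[i]] ((i : Int) + 1) none = -1
            · rw [if_pos hj]
              have hnone := pvFind_none rest rest[i] i h hj
              rw [pvB_tokEnd, dif_neg (lt_irrefl _), if_neg (lt_irrefl _)]
              unfold pvF
              rw [hdrop, List.foldl_cons, hstep, pvInq_no_close _ _ hnone]
              rw [pvSeg_all rest i rest.length le_rfl, hdrop]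
              simp [pvEmit]
            · rw [if_neg hj]
              obtain ⟨hj1, hj2, hj3, hj4⟩ := pvFind_some rest rest[i] i h hj
              set J := (PySem.Chars.findFrom rest [rest[i]] ((i : Int) + 1) none).toNat with hJdef
              have hcJ : rest[J] = rest[i] := by
                rw [List.getElem?_eq_getElem hj2] at hj3
                exact Option.some.inj hj3
              have hdropJ : rest.drop J = rest[i] :: rest.drop (J + 1) := by
                rw [List.drop_eq_getElem_cons hj2, hcJ]
              have hsplit : rest.drop (i + 1) = pvSeg rest (i + 1) J ++ (rest[i] :: rest.drop (J + 1)) := by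
                rw [← hdropJ, pvSeg_drop rest (i + 1) J hj1]
              unfold pvF
              rw [hdrop, List.foldl_cons, hstep, hsplit,
                pvInq_close (pvSeg rest (i + 1) J) rest[i] hj4 (rest.drop (J + 1))]
              have hIH := ih (J + 1) (by omega) (by omega) args
                (cur ++ [rest[i]] ++ pvSeg rest (i + 1) J ++ [rest[i]]) rest[i]
              unfold pvF at hIH
              rw [hIH]
              have hE := pvB_tokEnd_ge rest (J + 1)
              have hseg1 : pvSeg rest J (J + 1) = [rest[i]] := by
                rw [pvSeg_cons rest J (J + 1) hj2 (by omega), pvSeg_self, hcJ]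
              have hcurEq : cur ++ [rest[i]] ++ pvSeg rest (i + 1) J ++ [rest[i]]
                    ++ pvSeg rest (J + 1) (pvB_tokEnd rest (J + 1))
                  = cur ++ pvSeg rest i (pvB_tokEnd rest (J + 1)) := by
                have e1 : pvSeg rest (i + 1) J ++ pvSeg rest J (J + 1) = pvSeg rest (i + 1) (J + 1) :=
                  pvSeg_append rest (i + 1) J (J + 1) hj1 (by omega)
                have e2 : pvSeg rest (i + 1) (J + 1) ++ pvSeg rest (J + 1) (pvB_tokEnd rest (J + 1))
                    = pvSeg rest (i + 1) (pvB_tokEnd rest (J + 1)) :=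
                  pvSeg_append rest (i + 1) (J + 1) _ (by omega) hE
                have e3 : pvSeg rest i (pvB_tokEnd rest (J + 1))
                    = rest[i] :: pvSeg rest (i + 1) (pvB_tokEnd rest (J + 1)) :=
                  pvSeg_cons rest i _ h (by omega)
                rw [e3, ← e2, ← e1, hseg1]
                simp [List.append_assoc]
              rw [← hcurEq]
              by_cases hEl : pvB_tokEnd rest (J + 1) < rest.length
              · rw [if_pos hEl, if_pos hEl]
                have := pvF_qc_irrel (rest.drop (pvB_tokEnd rest (J + 1)))
                  (pvEmit args (cur ++ [rest[i]] ++ pvSeg rest (i + 1) J ++ [rest[i]]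
                    ++ pvSeg rest (J + 1) (pvB_tokEnd rest (J + 1)))) [] rest[i] qc
                unfold pvF at this
                rw [this]
              · rw [if_neg hEl, if_neg hEl]
          · next hq =>
            have hstep : pvA_step (args, cur, false, qc) rest[i]
                = (args, cur ++ [rest[i]], false, qc) := by
              simp only [pvA_step, Bool.false_eq_true, if_false, if_neg hq, if_neg hs]
            unfold pvF
            rw [hdrop, List.foldl_cons, hstep]
            have hIH := ih (i + 1) (by omega) (by omega) args (cur ++ [rest[i]]) qc
            unfold pvF at hIH
            rw [hIH]
            have hE := pvB_tokEnd_ge rest (i + 1)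
            have hcurEq : cur ++ [rest[i]] ++ pvSeg rest (i + 1) (pvB_tokEnd rest (i + 1))
                = cur ++ pvSeg rest i (pvB_tokEnd rest (i + 1)) := by
              rw [pvSeg_cons rest i _ h (by omega)]
              simp [List.append_assoc]
            rw [hcurEq]
      · have hie : i = rest.length := by omega
        subst hie
        rw [pvB_tokEnd, dif_neg (lt_irrefl _), if_neg (lt_irrefl _)]
        simp [pvF, pvEmit, pvSeg_self, List.drop_length]
  intro i hi args cur qc
  exact H rest.length i (by omega) hi args cur qc

-- MAIN: _split_args on rest[i:] from a clean state = pvB_loop from index i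
lemma pvMain (rest : List Char) : ∀ i args qc,
    pvF args [] false qc (rest.drop i) = pvB_loop rest i args := by
  have H : ∀ k i args qc, rest.length - i ≤ k →
      pvF args [] false qc (rest.drop i) = pvB_loop rest i args := by
    intro k
    induction k with
    | zero =>
      intro i args qc hk
      rw [pvB_loop, dif_neg (by omega)]
      rw [List.drop_eq_nil_of_le (by omega)]
      simp [pvF, pvEmit]
    | succ k ih =>
      intro i args qc hk
      by_cases h : i < rest.length
      · rw [pvB_loop, dif_pos h]
        have hdrop : rest.drop i = rest[i] :: rest.drop (i + 1) := List.drop_eq_getElem_cons h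
        by_cases hs : rest[i] = ' ' ∨ rest[i] = '\t'
        · rw [if_pos hs]
          have hstep : pvA_step (args, [], false, qc) rest[i] = (args, [], false, qc) := by
            rcases hs with h1 | h1 <;> rw [h1] <;> simp [pvA_step]
          unfold pvF
          rw [hdrop, List.foldl_cons, hstep]
          exact ih (i + 1) args qc (by omega)
        · rw [if_neg hs]
          rw [pvTok rest i (by omega) args [] qc]
          have hgt := pvB_tokEnd_gt rest i h hs
          have hne : pvSeg rest i (pvB_tokEnd rest i) ≠ [] := pvSeg_ne_nil rest i _ h hgt
          have hemit : pvEmit args ([] ++ pvSeg rest i (pvB_tokEnd rest i))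
              = args ++ [pvSeg rest i (pvB_tokEnd rest i)] := by
            simp [pvEmit, hne]
          by_cases hEl : pvB_tokEnd rest i < rest.length
          · rw [if_pos hEl, hemit]
            have := ih (pvB_tokEnd rest i) (args ++ [pvSeg rest i (pvB_tokEnd rest i)]) qc (by omega)
            rw [this]
            rfl
          · rw [if_neg hEl, hemit]
            rw [pvB_loop, dif_neg hEl]
            rfl
      · rw [pvB_loop, dif_neg h]
        rw [List.drop_eq_nil_of_le (by omega)]
        simp [pvF, pvEmit]
  intro i args qc
  exact H rest.length i args qc (by omega)

lemma pvArgs_eq (rest : List Char) : pvA_splitArgs rest = pvB_loop rest 0 [] := by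
  have h0 : pvA_splitArgs rest = pvF [] [] false ' ' rest := rfl
  have h1 := pvMain rest 0 [] ' '
  rw [List.drop_zero] at h1
  rw [h0, h1]

-- ===== mnemonic / rest decomposition =====

lemma pv_rstrip_def (l : List Char) :
    PySem.Chars.rstrip l = List.rdropWhile PySem.Chars.isspace l := rfl

lemma pv_lstrip_def (l : List Char) :
    PySem.Chars.lstrip l = List.dropWhile PySem.Chars.isspace l := rfl

lemma pv_rstrip_cons (c : Char) (l : List Char) :
    PySem.Chars.rstrip (c :: l) =
      if PySem.Chars.isspace c ∧ PySem.Chars.rstrip l = [] then []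
      else c :: PySem.Chars.rstrip l := by
  simp only [pv_rstrip_def, List.rdropWhile, List.reverse_cons, List.dropWhile_append]
  by_cases hl : List.dropWhile PySem.Chars.isspace l.reverse = []
  · by_cases hc : PySem.Chars.isspace c <;>
      simp [hl, List.dropWhile, hc]
  · have hne : (List.dropWhile PySem.Chars.isspace l.reverse).reverse ≠ [] := by
      simpa using hl
    simp [hl, hne]

lemma pv_rstrip_append (x y : List Char) :
    PySem.Chars.rstrip (x ++ y) =
      if PySem.Chars.rstrip y = [] then PySem.Chars.rstrip x else x ++ PySem.Chars.rstrip y := by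
  simp only [pv_rstrip_def, List.rdropWhile, List.reverse_append, List.dropWhile_append]
  by_cases hy : List.dropWhile PySem.Chars.isspace y.reverse = []
  · simp [hy]
  · have hne : (List.dropWhile PySem.Chars.isspace y.reverse).reverse ≠ [] := by
      simpa using hy
    simp [hy, hne]

lemma pv_strip_comm (l : List Char) :
    PySem.Chars.lstrip (PySem.Chars.rstrip l) = PySem.Chars.rstrip (PySem.Chars.lstrip l) := by
  induction l with
  | nil => rfl
  | cons c t ih =>
    by_cases hc : PySem.Chars.isspace c
    · have hl : PySem.Chars.lstrip (c :: t) = PySem.Chars.lstrip t := by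
        rw [pv_lstrip_def, pv_lstrip_def, List.dropWhile_cons, if_pos hc]
      rw [pv_rstrip_cons, hl]
      by_cases hts : PySem.Chars.rstrip t = []
      · rw [if_pos ⟨hc, hts⟩]
        have hall : ∀ x ∈ t, PySem.Chars.isspace x = true := by
          simpa [pv_rstrip_def] using hts
        have hlt : PySem.Chars.lstrip t = [] := by
          rw [pv_lstrip_def, List.dropWhile_eq_nil_iff]; exact hall
        rw [hlt]; rfl
      · rw [if_neg (by tauto)]
        have h2 : PySem.Chars.lstrip (c :: PySem.Chars.rstrip t)
            = PySem.Chars.lstrip (PySem.Chars.rstrip t) := by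
          rw [pv_lstrip_def, pv_lstrip_def, List.dropWhile_cons, if_pos hc]
        rw [h2, ih]
    · have hl : PySem.Chars.lstrip (c :: t) = c :: t := by
        rw [pv_lstrip_def, List.dropWhile_cons, if_neg hc]
      rw [pv_rstrip_cons, hl, pv_rstrip_cons, if_neg (by tauto)]
      rw [pv_lstrip_def, List.dropWhile_cons, if_neg hc]

lemma pv_dropWhile_head (p : Char → Bool) (l : List Char) (a : Char) (t : List Char)
    (h : List.dropWhile p l = a :: t) : p a = false := by
  induction l with
  | nil => simp at h
  | cons b l' ih =>
    rw [List.dropWhile_cons] at h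
    by_cases hb : p b
    · rw [if_pos hb] at h; exact ih h
    · rw [if_neg hb] at h
      injection h with h1 _
      subst h1
      simpa using hb

lemma pv_dropWhile_headOpt (p : Char → Bool) (l : List Char) (b : Char)
    (h : (List.dropWhile p l).head? = some b) : p b = false := by
  cases hD : List.dropWhile p l with
  | nil => rw [hD] at h; simp at h
  | cons x xs =>
    rw [hD] at h
    simp only [List.head?_cons, Option.some.injEq] at h
    rw [← h]
    exact pv_dropWhile_head p l x xs hD

lemma pv_prefix_head (x y : List Char) (h : x <+: y) (hx : x ≠ []) : x.head? = y.head? := by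
  obtain ⟨z, rfl⟩ := h
  cases x with
  | nil => exact absurd rfl hx
  | cons a t => rfl

lemma pv_take_mnemLen (s : List Char) :
    s.take (pvA_mnemLen s) = s.takeWhile (fun c => !PySem.Chars.isspace c) := by
  induction s with
  | nil => rfl
  | cons c t ih =>
    by_cases hc : PySem.Chars.isspace c <;>
      simp [pvA_mnemLen, hc, ih]

lemma pv_drop_mnemLen (s : List Char) :
    s.drop (pvA_mnemLen s) = s.dropWhile (fun c => !PySem.Chars.isspace c) := by
  induction s with
  | nil => rfl
  | cons c t ih =>
    by_cases hc : PySem.Chars.isspace c <;>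
      simp [pvA_mnemLen, hc, ih]

-- s.split(None, 1) in closed form
lemma pv_go0 (f : Nat) (l : List Char) (acc : List (List Char)) :
    PySem.Chars.split₀Max.go (f + 1) 0 l acc =
      (if PySem.Chars.lstrip l = [] then acc.reverse
       else (PySem.Chars.lstrip l :: acc).reverse) := by
  cases hl : List.dropWhile PySem.Chars.isspace l with
  | nil => simp [PySem.Chars.split₀Max.go, hl, pv_lstrip_def]
  | cons a t => simp [PySem.Chars.split₀Max.go, hl, pv_lstrip_def]

lemma pv_split01 (s : List Char) :
    PySem.Chars.split₀Max s 1 =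
      (if PySem.Chars.lstrip s = [] then []
       else
         let t := PySem.Chars.lstrip s
         let w := t.takeWhile (fun c => !PySem.Chars.isspace c)
         let r := PySem.Chars.lstrip (t.dropWhile (fun c => !PySem.Chars.isspace c))
         if r = [] then [w] else [w, r]) := by
  unfold PySem.Chars.split₀Max
  rw [if_neg (by norm_num)]
  cases hl : List.dropWhile PySem.Chars.isspace s with
  | nil => simp [PySem.Chars.split₀Max.go, hl, pv_lstrip_def]
  | cons a t0 =>
    have hs : s ≠ [] := by rintro rfl; simp at hl
    obtain ⟨k, hk⟩ : ∃ k, s.length = k + 1 := by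
      cases s with
      | nil => exact absurd rfl hs
      | cons b u => exact ⟨u.length, rfl⟩
    rw [hk]
    have h1 : PySem.Chars.split₀Max.go (k + 1 + 1) 1 s []
        = PySem.Chars.split₀Max.go (k + 1) 0
            (List.dropWhile (fun c => !PySem.Chars.isspace c) (a :: t0))
            [List.takeWhile (fun c => !PySem.Chars.isspace c) (a :: t0)] := by
      simp [PySem.Chars.split₀Max.go, hl]
    rw [show (1 : Int).toNat = 1 from rfl, h1, pv_go0]
    simp only [pv_lstrip_def, hl]
    by_cases hr :
        List.dropWhile PySem.Chars.isspace
          (List.dropWhile (fun c => !PySem.Chars.isspace c) (a :: t0)) = [] <;>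
      simp [hr]

-- ===== VERDICT (by name: the statement is the Claim_ definition above) =====

theorem normalize_scpi_spec : Claim_equal_normalize_scpi := by
  intro raw _
  show normalize_scpi raw = normalize_scpi_alt raw
  unfold normalize_scpi normalize_scpi_alt
  dsimp only
  have hsplit : PySem.Str.split₀Max raw 1
      = List.map String.ofList (PySem.Chars.split₀Max raw.toList 1) := rfl
  rw [hsplit, pv_split01]
  have hstrip : PySem.Chars.strip raw.toList
      = PySem.Chars.rstrip (PySem.Chars.lstrip raw.toList) := rfl
  by_cases ht : PySem.Chars.lstrip raw.toList = []
  · have hs0 : PySem.Chars.strip raw.toList = [] := by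
      rw [hstrip, ht]; rfl
    simp [ht, hs0]
  · rw [if_neg ht]
    set t := PySem.Chars.lstrip raw.toList with htdef
    set w := t.takeWhile (fun c => !PySem.Chars.isspace c) with hwdef
    set u := t.dropWhile (fun c => !PySem.Chars.isspace c) with hudef
    set r := PySem.Chars.lstrip u with hrdef
    have hwu : w ++ u = t := List.takeWhile_append_dropWhile
    have hw_all : ∀ c ∈ w, (!PySem.Chars.isspace c) = true := by
      intro c hc
      exact List.mem_takeWhile_imp (p := fun c => !PySem.Chars.isspace c) hc
    -- the head of t is not a space, so w ≠ []
    have hw_ne : w ≠ [] := by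
      cases hT : t with
      | nil => exact absurd hT ht
      | cons a t' =>
        have ha : PySem.Chars.isspace a = false :=
          pv_dropWhile_head _ raw.toList a t' (by rw [← pv_lstrip_def, ← htdef]; exact hT)
        rw [hwdef, hT, List.takeWhile_cons_of_pos (by simp [ha])]
        simp
    have hw_rstrip : PySem.Chars.rstrip w = w := by
      rw [pv_rstrip_def, List.rdropWhile_eq_self_iff]
      intro hl
      have := hw_all _ (List.getLast_mem hl)
      simpa using this
    by_cases hr : r = []
    · -- everything after the mnemonic is whitespace: both return (w.upper(), [])
      have hu_all : ∀ c ∈ u, PySem.Chars.isspace c = true := by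
        simpa [hrdef, pv_lstrip_def, List.dropWhile_eq_nil_iff] using hr
      have hru : PySem.Chars.rstrip u = [] := by
        rw [pv_rstrip_def]; simpa [List.rdropWhile_eq_nil_iff] using hu_all
      have hs_eq : PySem.Chars.strip raw.toList = w := by
        rw [hstrip, ← hwu, pv_rstrip_append, if_pos hru, hw_rstrip]
      rw [if_pos hr]
      rw [hs_eq, if_neg hw_ne]
      have htake : w.take (pvA_mnemLen w) = w := by
        rw [pv_take_mnemLen, List.takeWhile_eq_self_iff.mpr hw_all]
      have hdrop : w.drop (pvA_mnemLen w) = [] := by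
        rw [pv_drop_mnemLen, List.dropWhile_eq_nil_iff.mpr hw_all]
      rw [htake, hdrop]
      have : PySem.Chars.strip [] = [] := rfl
      rw [this, if_pos rfl]
      simp [PySem.Str.upper, String.toList_ofList]
      rw [hwdef]
    · -- a real argument tail exists
      rw [if_neg hr]
      have hu_ne : u ≠ [] := by
        intro hco
        apply hr
        rw [hrdef, hco]
        rfl
      have hru_ne : PySem.Chars.rstrip u ≠ [] := by
        intro hco
        apply hr
        rw [pv_rstrip_def, List.rdropWhile_eq_nil_iff] at hco
        rw [hrdef, pv_lstrip_def, List.dropWhile_eq_nil_iff]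
        exact hco
      have hs_eq : PySem.Chars.strip raw.toList = w ++ PySem.Chars.rstrip u := by
        rw [hstrip, ← hwu, pv_rstrip_append, if_neg hru_ne]
      -- the head of rstrip u is a space
      obtain ⟨b, tail, hbt, hb⟩ : ∃ b tail, PySem.Chars.rstrip u = b :: tail ∧
          PySem.Chars.isspace b = true := by
        have hpre : PySem.Chars.rstrip u <+: u := by
          rw [pv_rstrip_def]; exact List.rdropWhile_prefix _ _
        have hhd := pv_prefix_head _ _ hpre hru_ne
        cases hV : PySem.Chars.rstrip u with
        | nil => exact absurd hV hru_ne
        | cons b tl =>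
          refine ⟨b, tl, rfl, ?_⟩
          have hub : (List.dropWhile (fun c => !PySem.Chars.isspace c) t).head? = some b := by
            rw [← hudef, ← hhd, hV]; rfl
          have := pv_dropWhile_headOpt _ t b hub
          simpa using this
      have htakes : (w ++ PySem.Chars.rstrip u).takeWhile (fun c => !PySem.Chars.isspace c) = w := by
        rw [List.takeWhile_append, if_pos (by rw [List.takeWhile_eq_self_iff.mpr hw_all]),
          hbt, List.takeWhile_cons_of_neg (by simp [hb])]
        simp
      have hdrops : (w ++ PySem.Chars.rstrip u).dropWhile (fun c => !PySem.Chars.isspace c)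
          = PySem.Chars.rstrip u := by
        rw [List.dropWhile_append]
        have hwe : (w.dropWhile (fun c => !PySem.Chars.isspace c)) = [] :=
          List.dropWhile_eq_nil_iff.mpr hw_all
        rw [if_pos (by simp [hwe]), hbt, List.dropWhile_cons_of_neg (by simp [hb])]
      have hs_ne : PySem.Chars.strip raw.toList ≠ [] := by
        rw [hs_eq]
        simp [hw_ne]
      rw [if_neg hs_ne, hs_eq, pv_take_mnemLen, pv_drop_mnemLen, htakes, hdrops]
      -- rest on the A side: strip (rstrip u) = rstrip r
      have hlr : PySem.Chars.lstrip r = r := by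
        rw [hrdef, pv_lstrip_def, pv_lstrip_def, List.dropWhile_idempotent]
      have hrestA : PySem.Chars.strip (PySem.Chars.rstrip u) = PySem.Chars.rstrip r := by
        show PySem.Chars.rstrip (PySem.Chars.lstrip (PySem.Chars.rstrip u)) = _
        rw [pv_strip_comm, ← hrdef, pv_rstrip_def, pv_rstrip_def, List.rdropWhile_idempotent]
      have hrr_ne : PySem.Chars.rstrip r ≠ [] := by
        intro hco
        rw [pv_rstrip_def, List.rdropWhile_eq_nil_iff] at hco
        cases hR : r with
        | nil => exact hr hR
        | cons a' r' =>
          have hhead : PySem.Chars.isspace a' = false :=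
            pv_dropWhile_head _ u a' r' (by rw [← pv_lstrip_def, ← hrdef]; exact hR)
          have hsp := hco a' (by rw [hR]; simp)
          rw [hsp] at hhead
          simp at hhead
      rw [hrestA, if_neg hrr_ne]
      simp only [List.map_cons, List.map_nil]
      have hrestB : PySem.Chars.strip
          ((String.ofList (PySem.Chars.lstrip (List.dropWhile (fun c => !PySem.Chars.isspace c) t))).toList)
          = PySem.Chars.rstrip r := by
        rw [String.toList_ofList, ← hudef, ← hrdef]
        show PySem.Chars.rstrip (PySem.Chars.lstrip r) = _
        rw [hlr]
      rw [hrestB, pvArgs_eq]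
      simp [PySem.Str.upper, String.toList_ofList]
      rw [hwdef]
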